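-- pv_equiv track=rewrite | github.com/zhoubintao-bytedance/rqalpha | skyeye/data/facade.py | _group_missing_ranges
-- ===== SOURCE A (Python) =====
-- def _group_missing_ranges(ordered_date_keys: list[str], missing_date_keys: set[str]) -> list[tuple[str, str]]:
--     """把离散缺失日期按原始顺序压成连续区间。"""
--     ranges = []
--     range_start = None
--     previous = None
--     for date_key in ordered_date_keys:
--         if date_key in missing_date_keys:
--             if range_start is None:
--                 range_start = date_key
--             previous = date_key
--             continue
--         if range_start is not None:
--             ranges.append((range_start, previous))
--             range_start = None
--             previous = None
--     if range_start is not None: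
--         ranges.append((range_start, previous))
--     return ranges
-- ===== SOURCE B (Python) =====
-- def _group_missing_ranges(ordered_date_keys, missing_date_keys):
--     """把离散缺失日期按原始顺序压成连续区间。"""
--     pairs = [(i, d) for i, d in enumerate(ordered_date_keys) if d in missing_date_keys]
--     if not pairs:
--         return []
--     adj = list(zip(pairs, pairs[1:]))
--     starts = [pairs[0][1]] + [b[1] for a, b in adj if b[0] != a[0] + 1]
--     ends = [a[1] for a, b in adj if b[0] != a[0] + 1] + [pairs[-1][1]]
--     return list(zip(starts, ends))
-- ===== Notes on version B (the rewrite author's own statement) =====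
-- stated objective: alternative
-- what changed: Replaces A's single stateful sentinel loop (range_start/previous with a trailing flush) by a stateless staged pipeline: filter to (index, date) pairs, detect run breaks via a pairwise zip on index adjacency, and zip the resulting start list with the end list.
import Mathlib
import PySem

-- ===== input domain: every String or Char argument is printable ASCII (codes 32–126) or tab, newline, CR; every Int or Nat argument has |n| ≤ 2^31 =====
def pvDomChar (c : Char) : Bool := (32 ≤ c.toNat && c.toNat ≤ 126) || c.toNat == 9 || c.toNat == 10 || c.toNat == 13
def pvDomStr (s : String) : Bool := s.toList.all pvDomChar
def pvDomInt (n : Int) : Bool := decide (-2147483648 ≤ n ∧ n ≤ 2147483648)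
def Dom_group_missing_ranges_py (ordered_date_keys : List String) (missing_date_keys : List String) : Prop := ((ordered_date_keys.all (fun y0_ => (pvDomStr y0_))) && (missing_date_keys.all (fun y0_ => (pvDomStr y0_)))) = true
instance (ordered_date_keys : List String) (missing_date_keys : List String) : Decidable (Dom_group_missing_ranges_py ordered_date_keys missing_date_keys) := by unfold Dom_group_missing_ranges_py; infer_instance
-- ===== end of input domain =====

-- B replaces A's stateful sentinel loop by a staged, stateless pipeline: filter to (index, date)
-- pairs, mark run breaks by pairwise index adjacency, zip the start list with the end list
-- (objective: alternative).
-- ===== PORT A =====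
-- A's loop: state (ranges, range_start, previous); 'previous' is some _ whenever 'range_start' is,
-- so '.getD ""' on 'previous' at an append is never the default (the invariant is proved below).
def pvALoop (missing_date_keys : List String) :
    List (String × String) → Option String → Option String → List String →
    List (String × String) × Option String × Option String
  | ranges, range_start, previous, [] => (ranges, range_start, previous)
  | ranges, range_start, previous, date_key :: rest =>
    if missing_date_keys.contains date_key then
      pvALoop missing_date_keys ranges
        (if range_start.isNone then some date_key else range_start) (some date_key) rest
    else
      match range_start with
      | some s => pvALoop missing_date_keys (ranges ++ [(s, previous.getD "")]) none none rest
      | none => pvALoop missing_date_keys ranges none previous rest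

def group_missing_ranges_py (ordered_date_keys : List String) (missing_date_keys : List String) : List (String × String) :=
  match pvALoop missing_date_keys [] none none ordered_date_keys with
  | (ranges, some s, previous) => ranges ++ [(s, previous.getD "")]
  | (ranges, none, _) => ranges

-- ===== PORT B =====
-- Source B after building 'pairs': empty guard, adj = zip(pairs, pairs[1:]), the two break
-- comprehensions ('starts' and 'ends'), and the final zip(starts, ends).
def pvCore : List (Int × String) → List (String × String)
  | [] => []
  | p0 :: rest =>
    (p0.2 :: ((p0 :: rest).zip rest).filterMap
        (fun ab => if ab.2.1 ≠ ab.1.1 + 1 then some ab.2.2 else none)).zip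
      ((((p0 :: rest).zip rest).filterMap
        (fun ab => if ab.2.1 ≠ ab.1.1 + 1 then some ab.1.2 else none)) ++
        [((p0 :: rest).getLastD p0).2])

def group_missing_ranges_py_alt (ordered_date_keys : List String) (missing_date_keys : List String) : List (String × String) :=
  pvCore ((PySem.List.enumerate ordered_date_keys 0).filter
    (fun p => missing_date_keys.contains p.2))

-- ===== PRECONDITION & SPEC =====
def Spec_group_missing_ranges_py (ordered_date_keys : List String) (missing_date_keys : List String) (out : List (String × String)) : Prop := out = group_missing_ranges_py_alt ordered_date_keys missing_date_keys
instance (ordered_date_keys : List String) (missing_date_keys : List String) (out : List (String × String)) : Decidable (Spec_group_missing_ranges_py ordered_date_keys missing_date_keys out) := by unfold Spec_group_missing_ranges_py; infer_instance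

-- ===== CLAIM (what is proved, stated in full; the proofs are below) =====
def Claim_equal_group_missing_ranges_py : Prop := ∀ (ordered_date_keys : List String) (missing_date_keys : List String), Dom_group_missing_ranges_py ordered_date_keys missing_date_keys → Spec_group_missing_ranges_py ordered_date_keys missing_date_keys (group_missing_ranges_py ordered_date_keys missing_date_keys)

-- ===== LEMMAS AND PROOFS =====

-- Common reference form both ports are reduced to: the run decomposition by takeWhile/dropWhile.
def pvRuns (ordered_date_keys : List String) (missing_date_keys : List String) : List (String × String) :=
  match ordered_date_keys with
  | [] => []
  | d :: rest =>
    if missing_date_keys.contains d then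
      (d, (rest.takeWhile (fun x => missing_date_keys.contains x)).getLastD d) ::
        pvRuns (rest.dropWhile (fun x => missing_date_keys.contains x)) missing_date_keys
    else
      pvRuns rest missing_date_keys
termination_by ordered_date_keys.length
decreasing_by
  · exact Nat.lt_succ_of_le (List.length_dropWhile_le _ _)
  · exact Nat.lt_succ_self _

theorem pvLast (d p : String) (l : List String) :
    (d :: l).getLast?.getD p = l.getLast?.getD d := by
  induction l generalizing d p with
  | nil => rfl
  | cons x xs ih => rw [List.getLast?_cons_cons, ih x p, ih x d]

theorem pvRuns_pos (miss : List String) (d : String) (rest : List String)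
    (h : miss.contains d = true) :
    pvRuns (d :: rest) miss =
      (d, (rest.takeWhile (fun x => miss.contains x)).getLastD d) ::
        pvRuns (rest.dropWhile (fun x => miss.contains x)) miss := by
  have hm : d ∈ miss := by simpa using h
  rw [pvRuns]; simp [hm]

theorem pvRuns_neg (miss : List String) (d : String) (rest : List String)
    (h : ¬ miss.contains d = true) :
    pvRuns (d :: rest) miss = pvRuns rest miss := by
  have hm : d ∉ miss := by simpa using h
  rw [pvRuns]; simp [hm]

-- A's loop equals pvRuns (both loop states handled in one induction).
theorem pvMainA (miss : List String) (l : List String) :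
    (∀ ranges,
      (match pvALoop miss ranges none none l with
       | (rs, some s, prev) => rs ++ [(s, prev.getD "")]
       | (rs, none, _) => rs) = ranges ++ pvRuns l miss) ∧
    (∀ ranges s p,
      (match pvALoop miss ranges (some s) (some p) l with
       | (rs, some s', prev) => rs ++ [(s', prev.getD "")]
       | (rs, none, _) => rs) =
      ranges ++ (s, (l.takeWhile (fun x => miss.contains x)).getLastD p) ::
        pvRuns (l.dropWhile (fun x => miss.contains x)) miss) := by
  induction l with
  | nil =>
    refine ⟨fun ranges => by simp [pvALoop, pvRuns],
            fun ranges s p => by simp [pvALoop, pvRuns]⟩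
  | cons d rest ih =>
    by_cases hm : d ∈ miss
    · have hc : miss.contains d = true := by simpa using hm
      refine ⟨fun ranges => ?_, fun ranges s p => ?_⟩
      · rw [show pvALoop miss ranges none none (d :: rest)
              = pvALoop miss ranges (some d) (some d) rest by simp [pvALoop, hm]]
        rw [ih.2 ranges d d, pvRuns_pos miss d rest hc]
      · rw [show pvALoop miss ranges (some s) (some p) (d :: rest)
              = pvALoop miss ranges (some s) (some d) rest by simp [pvALoop, hm]]
        rw [ih.2 ranges s d, List.takeWhile_cons, List.dropWhile_cons]
        simp [hm, pvLast]
    · have hc : ¬ miss.contains d = true := by simpa using hm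
      refine ⟨fun ranges => ?_, fun ranges s p => ?_⟩
      · rw [show pvALoop miss ranges none none (d :: rest)
              = pvALoop miss ranges none none rest by simp [pvALoop, hm]]
        rw [ih.1 ranges, pvRuns_neg miss d rest hc]
      · rw [show pvALoop miss ranges (some s) (some p) (d :: rest)
              = pvALoop miss (ranges ++ [(s, p)]) none none rest by simp [pvALoop, hm]]
        rw [ih.1 (ranges ++ [(s, p)]), List.takeWhile_cons, List.dropWhile_cons,
            if_neg hc, if_neg hc, pvRuns_neg miss d rest hc]
        simp

-- B side: pvP is enumerate-then-filter, written recursively for the induction.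
def pvP (miss : List String) : Int → List String → List (Int × String)
  | _, [] => []
  | i, d :: r =>
    if miss.contains d then (i, d) :: pvP miss (i + 1) r else pvP miss (i + 1) r

theorem pvP_eq_filter (miss : List String) (l : List String) :
    ∀ i, (PySem.List.enumerate l i).filter (fun p => miss.contains p.2) = pvP miss i l := by
  induction l with
  | nil => intro i; simp [PySem.List.enumerate_nil, pvP]
  | cons d r ih =>
    intro i
    rw [PySem.List.enumerate_cons, List.filter_cons]
    by_cases h : d ∈ miss
    · simp [pvP, h]
      simpa using ih (i + 1)
    · simp [pvP, h]
      simpa using ih (i + 1)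

theorem pvP_head_ge (miss : List String) (l : List String) :
    ∀ i q qs, pvP miss i l = q :: qs → i ≤ q.1 := by
  induction l with
  | nil => intro i q qs h; simp [pvP] at h
  | cons d r ih =>
    intro i q qs h
    by_cases hd : miss.contains d = true
    · rw [show pvP miss i (d :: r) = (i, d) :: pvP miss (i + 1) r by
        simp only [pvP, if_pos hd]] at h
      obtain ⟨h1, -⟩ := List.cons.injEq .. ▸ h
      rw [← h1]
    · rw [show pvP miss i (d :: r) = pvP miss (i + 1) r by
        simp only [pvP, if_neg hd]] at h
      have := ih (i + 1) q qs h
      omega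

-- run machine characterising pvCore on a nonempty pair list
def pvH (s : String) (p : Int × String) : List (Int × String) → List (String × String)
  | [] => [(s, p.2)]
  | q :: qs => if q.1 = p.1 + 1 then pvH s q qs else (s, p.2) :: pvH q.2 q qs

theorem pvZip (ps : List (Int × String)) :
    ∀ (s : String) (p : Int × String),
    ((s :: ((p :: ps).zip ps).filterMap
        (fun ab => if ab.2.1 ≠ ab.1.1 + 1 then some ab.2.2 else none)).zip
      ((((p :: ps).zip ps).filterMap
        (fun ab => if ab.2.1 ≠ ab.1.1 + 1 then some ab.1.2 else none)) ++
        [((p :: ps).getLastD p).2])) = pvH s p ps := by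
  induction ps with
  | nil => intro s p; simp [pvH]
  | cons q qs ih =>
    intro s p
    by_cases h : q.1 = p.1 + 1
    · simp only [List.zip_cons_cons, List.filterMap_cons, h, ne_eq, not_true_eq_false,
        if_false, List.getLastD_cons]
      have := ih s q
      simp only [List.getLastD_cons] at this
      rw [this, pvH, if_pos h]
    · simp only [List.zip_cons_cons, List.filterMap_cons, h, ne_eq, not_false_eq_true,
        if_true, List.getLastD_cons, List.cons_append]
      have := ih q.2 q
      simp only [List.getLastD_cons, ne_eq] at this
      rw [this, pvH, if_neg h]

theorem pvCore_cons (p : Int × String) (ps : List (Int × String)) :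
    pvCore (p :: ps) = pvH p.2 p ps := by
  rw [pvCore]; exact pvZip ps p.2 p

theorem pvHrun (miss : List String) (r : List String) :
    ∀ (i : Int) (s d : String),
    pvH s (i, d) (pvP miss (i + 1) r) =
      (s, (r.takeWhile (fun x => miss.contains x)).getLastD d) ::
        pvCore (pvP miss (i + 1 + ((r.takeWhile (fun x => miss.contains x)).length : Int))
          (r.dropWhile (fun x => miss.contains x))) := by
  induction r with
  | nil => intro i s d; simp [pvP, pvH, pvCore]
  | cons e r' ih =>
    intro i s d
    by_cases he : miss.contains e = true
    · rw [show pvP miss (i + 1) (e :: r') = (i + 1, e) :: pvP miss (i + 1 + 1) r' by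
        simp only [pvP, if_pos he]]
      rw [show pvH s (i, d) ((i + 1, e) :: pvP miss (i + 1 + 1) r') =
            pvH s (i + 1, e) (pvP miss (i + 1 + 1) r') by simp [pvH]]
      rw [ih (i + 1) s e]
      rw [List.takeWhile_cons, List.dropWhile_cons, if_pos he, if_pos he]
      rw [List.getLastD_cons]
      rw [show i + 1 + 1 + ((List.takeWhile (fun x => miss.contains x) r').length : Int) =
            i + 1 + (((e :: List.takeWhile (fun x => miss.contains x) r').length : Nat) : Int) by
        simp only [List.length_cons]; push_cast; ring]
    · rw [List.takeWhile_cons, List.dropWhile_cons, if_neg he, if_neg he]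
      simp only [List.length_nil, Nat.cast_zero, add_zero, List.getLastD_nil]
      rw [show pvP miss (i + 1) (e :: r') = pvP miss (i + 1 + 1) r' by
        simp only [pvP, if_neg he]]
      cases hq : pvP miss (i + 1 + 1) r' with
      | nil => simp [pvH, pvCore]
      | cons q qs =>
        have hge : i + 1 + 1 ≤ q.1 := pvP_head_ge miss r' (i + 1 + 1) q qs hq
        have hne : ¬ q.1 = i + 1 := by omega
        simp only [pvH]
        rw [if_neg hne, pvCore_cons]

theorem pvMainB (miss : List String) :
    ∀ (n : Nat) (l : List String), l.length ≤ n → ∀ i,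
    pvCore (pvP miss i l) = pvRuns l miss := by
  intro n
  induction n with
  | zero =>
    intro l hl i
    have : l = [] := List.eq_nil_of_length_eq_zero (Nat.le_zero.mp hl)
    subst this; simp [pvP, pvCore, pvRuns]
  | succ n ih =>
    intro l hl i
    cases l with
    | nil => simp [pvP, pvCore, pvRuns]
    | cons d r =>
      by_cases hd : miss.contains d = true
      · rw [show pvP miss i (d :: r) = (i, d) :: pvP miss (i + 1) r by
          simp only [pvP, if_pos hd]]
        rw [pvCore_cons]
        rw [show ((i, d) : Int × String).2 = d from rfl]
        rw [pvHrun miss r i d d]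
        rw [pvRuns_pos miss d r hd]
        congr 1
        exact ih _ (by
          have := List.length_dropWhile_le (fun x => miss.contains x) r
          simp at hl; omega) _
      · rw [show pvP miss i (d :: r) = pvP miss (i + 1) r by
          simp only [pvP, if_neg hd]]
        rw [pvRuns_neg miss d r hd]
        exact ih r (by simp at hl; omega) (i + 1)

-- ===== VERDICT (by name: the statement is the Claim_ definition above) =====
theorem group_missing_ranges_py_spec : Claim_equal_group_missing_ranges_py := by
  intro ordered missing _
  unfold Spec_group_missing_ranges_py group_missing_ranges_py group_missing_ranges_py_alt
  rw [pvP_eq_filter missing ordered 0,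
      pvMainB missing ordered.length ordered le_rfl 0]
  simpa using (pvMainA missing ordered).1 []
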